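-- pv_equiv track=rewrite | github.com/pypi-data/pypi-mirror-330 | packages/gscrew/gscrew-1.1.0.tar.gz/gscrew-1.1.0/gscrew/geometric_algebra.py | __get_sign
-- ===== SOURCE A (Python) =====
-- def __get_sign(index1: int, index2: int):
--     """Calculate the sign of the geometric product between the given basis blades.
--
--     Parameters
--     ----------
--     index1 : int
--         The index of the first basis blade.
--     index2 : int
--         The index of the second basis blade.
--
--     Returns
--     -------
--     out : int
--         The sign of the geometric product between the two basis blades.
--     """
--     index1 //= 2
--     n_swap = 0
--     while index1:
--         n_swap += (index1 & index2).bit_count()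
--         index1 //= 2
--     n_swap += 1
--     return 2 * (n_swap % 2) - 1
-- ===== SOURCE B (Python) =====
-- def __get_sign(index1: int, index2: int):
--     """Sign of the geometric product of two basis blades.
--
--     Single low-to-high scan over the bit positions of index1, maintaining a
--     running count of index2-bits already seen below the current position,
--     instead of repeated popcounts of shifted masks.
--     """
--     n_swap = 0
--     low2 = 0  # number of set bits of index2 strictly below position p
--     for p in range(index1.bit_length()):
--         if p and (index1 >> p) & 1:
--             n_swap += low2
--         if (index2 >> p) & 1:
--             low2 += 1
--     return 1 - 2 * (n_swap % 2)
-- ===== Notes on version B (the rewrite author's own statement) =====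
-- stated objective: alternative
-- what changed: Replaces the while-loop that repeatedly ANDs the whole shifted index1 with index2 and popcounts the result by a single low-to-high scan over index1's bit positions that maintains a running count of index2-bits already seen, adding that count whenever index1 has a bit; proved equal for index1 >= 0 (any index2).
import Mathlib
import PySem

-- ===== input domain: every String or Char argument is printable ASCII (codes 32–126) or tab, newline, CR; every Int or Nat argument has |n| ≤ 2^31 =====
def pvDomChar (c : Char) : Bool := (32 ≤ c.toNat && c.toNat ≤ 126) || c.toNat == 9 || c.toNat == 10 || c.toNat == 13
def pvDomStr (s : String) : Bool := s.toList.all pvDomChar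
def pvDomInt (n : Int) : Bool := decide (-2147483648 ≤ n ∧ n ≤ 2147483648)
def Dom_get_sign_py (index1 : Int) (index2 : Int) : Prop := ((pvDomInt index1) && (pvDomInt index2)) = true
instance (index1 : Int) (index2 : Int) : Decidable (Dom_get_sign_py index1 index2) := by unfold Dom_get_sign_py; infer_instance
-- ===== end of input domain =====

-- B replaces A's repeated AND+popcount over a shifting mask by one low-to-high scan of
-- index1's bit positions with a running count of index2-bits seen so far (objective: alternative).

-- ===== PORT A =====
-- 'while index1: n_swap += (index1 & index2).bit_count(); index1 //= 2'.
-- For index1 < 0 the Python loop never terminates (index1 // 2 reaches the fixpoint -1),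
-- so those inputs are excluded by Pre_; the '0 < m' guard only makes the recursion total.
def getSignLoopA (m : Int) (b : Int) (ns : Nat) : Nat :=
  if 0 < m then
    getSignLoopA (PySem.Int.floordiv m 2) b (ns + PySem.Int.bitCount (PySem.Int.band m b))
  else ns
termination_by m.toNat
decreasing_by
  rw [PySem.Int.floordiv_eq_ediv_of_pos (by omega : (0:Int) < 2)]
  omega

def get_sign_py (index1 : Int) (index2 : Int) : Int :=
  2 * PySem.Int.mod ((getSignLoopA (PySem.Int.floordiv index1 2) index2 0 : Int) + 1) 2 - 1

-- ===== PORT B =====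
-- single scan: for p in range(index1.bit_length()): if p and (index1>>p)&1: n_swap += low2;
--              if (index2>>p)&1: low2 += 1;  return 1 - 2 * (n_swap % 2)
def get_sign_py_alt (index1 : Int) (index2 : Int) : Int :=
  let st := (List.range (PySem.Int.bitLength index1)).foldl
    (fun (st : Nat × Nat) (p : Nat) =>
      (if p ≠ 0 ∧ PySem.Int.band (index1 >>> (p : Int)) 1 = 1 then st.1 + st.2 else st.1,
       if PySem.Int.band (index2 >>> (p : Int)) 1 = 1 then st.2 + 1 else st.2))
    (0, 0)
  1 - 2 * PySem.Int.mod (st.1 : Int) 2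

-- ===== PRECONDITION & SPEC =====
-- Pre_ excludes index1 < 0, where Python A DIVERGES (the while-loop never exits: index1//2 → -1).
def Pre_get_sign_py (index1 : Int) (index2 : Int) : Prop := 0 ≤ index1
instance (index1 : Int) (index2 : Int) : Decidable (Pre_get_sign_py index1 index2) := by
  unfold Pre_get_sign_py; infer_instance
def pvWitness_get_sign_py : Int × Int := (6, -5)

def Spec_get_sign_py (index1 : Int) (index2 : Int) (out : Int) : Prop := out = get_sign_py_alt index1 index2
instance (index1 : Int) (index2 : Int) (out : Int) : Decidable (Spec_get_sign_py index1 index2 out) := by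
  unfold Spec_get_sign_py; infer_instance

-- ===== CLAIM (what is proved, stated in full; the proofs are below) =====
def Claim_equal_get_sign_py : Prop := ∀ (index1 : Int) (index2 : Int), Dom_get_sign_py index1 index2 → Pre_get_sign_py index1 index2 → Spec_get_sign_py index1 index2 (get_sign_py index1 index2)

-- ===== LEMMAS AND PROOFS =====

-- 0/1 indicator of a bit of a Nat / of an Int (Int.testBit is Python's two's-complement bit)
def bit1 (a : Nat) (p : Nat) : Nat := if a.testBit p then 1 else 0
def bit2 (b : Int) (p : Nat) : Nat := if b.testBit p then 1 else 0
-- number of set bits of b strictly below position p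
def ones (b : Int) (p : Nat) : Nat := ∑ j ∈ Finset.range p, bit2 b j

theorem ones_succ (b : Int) (n : Nat) : ones b (n + 1) = ones b n + bit2 b n := by
  simp [ones, Finset.sum_range_succ]

theorem pc_cast : ∀ (k m : Nat), m < 2 ^ k →
    PySem.Int.bitCount (m : Int) = ∑ p ∈ Finset.range k, bit1 m p := by
  intro k
  induction k with
  | zero => intro m hm; interval_cases m; simp [PySem.Int.bitCount_zero]
  | succ k ih =>
    intro m hm
    rcases Nat.eq_zero_or_pos m with h0 | h0
    · subst h0; simp [PySem.Int.bitCount_zero, bit1]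
    · rw [PySem.Int.bitCount_natCast h0, ih (m / 2) (by omega)]
      rw [Finset.sum_range_succ']
      have h2 : ∀ p, bit1 (m / 2) p = bit1 m (p + 1) := by
        intro p; simp [bit1, Nat.testBit_div_two]
      simp only [h2]
      have : bit1 m 0 = m % 2 := by
        simp [bit1, Nat.testBit_zero]; rcases Nat.mod_two_eq_zero_or_one m with h | h <;> simp [h]
      omega

theorem land_div_two (m c : Nat) : (m &&& c) / 2 = (m / 2) &&& (c / 2) := by
  apply Nat.eq_of_testBit_eq; intro i
  simp [Nat.testBit_div_two]

theorem land_mod_two (m c : Nat) : (m &&& c) % 2 = (m % 2) * (c % 2) := by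
  have h := Nat.testBit_land m c 0
  simp only [Nat.testBit_zero] at h
  rcases Nat.mod_two_eq_zero_or_one m with h' | h' <;>
    rcases Nat.mod_two_eq_zero_or_one c with h'' | h'' <;>
      rcases Nat.mod_two_eq_zero_or_one (m &&& c) with h3 | h3 <;>
        simp [h', h'', h3] at h ⊢

-- bitwise subtraction of a sub-mask has no borrows
theorem sub_land_testBit : ∀ (p m c : Nat),
    (m - (m &&& c)).testBit p = (m.testBit p && !(c.testBit p)) := by
  intro p
  induction p with
  | zero =>
    intro m c
    have hd : (m &&& c) / 2 ≤ m / 2 := by rw [land_div_two]; exact Nat.and_le_left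
    have h1 := land_mod_two m c
    simp only [Nat.testBit_zero]
    have hval : (m - (m &&& c)) % 2 = (m % 2) * (1 - c % 2) := by
      rcases Nat.mod_two_eq_zero_or_one m with h' | h' <;>
        rcases Nat.mod_two_eq_zero_or_one c with h'' | h'' <;> simp only [h', h''] at h1 ⊢ <;> omega
    rw [hval]
    rcases Nat.mod_two_eq_zero_or_one m with h' | h' <;>
      rcases Nat.mod_two_eq_zero_or_one c with h'' | h'' <;> simp [h', h'']
  | succ p ih =>
    intro m c
    have hd : (m &&& c) / 2 ≤ m / 2 := by rw [land_div_two]; exact Nat.and_le_left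
    have h1 := land_mod_two m c
    have hsub : (m - (m &&& c)) / 2 = m / 2 - ((m / 2) &&& (c / 2)) := by
      rw [← land_div_two]
      rcases Nat.mod_two_eq_zero_or_one m with h' | h' <;>
        rcases Nat.mod_two_eq_zero_or_one c with h'' | h'' <;> simp only [h', h''] at h1 <;> omega
    rw [Nat.testBit_succ, hsub, ih, Nat.testBit_succ, Nat.testBit_succ]

-- Python's  m & b  for m : Nat and any Int b, as a Nat with pointwise bits
theorem band_toNat (m : Nat) (b : Int) :
    ∃ w : Nat, PySem.Int.band (m : Int) b = (w : Int) ∧ w ≤ m ∧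
      ∀ p, w.testBit p = (m.testBit p && b.testBit p) := by
  cases b with
  | ofNat n =>
    refine ⟨m &&& n, ?_, Nat.and_le_left, ?_⟩
    · have := PySem.Int.band_of_nonneg (a := (m : Int)) (b := (n : Int))
        (by positivity) (by positivity)
      simp only [Int.toNat_natCast] at this
      exact this
    · intro p; simp [Int.testBit]
  | negSucc c =>
    refine ⟨m - (m &&& c), ?_, by omega, ?_⟩
    · show PySem.Int.band (m : Int) (Int.negSucc c) = _
      unfold PySem.Int.band
      have h1 : (0 : Int) ≤ (m : Int) := by positivity
      have h2 : ¬ (0 : Int) ≤ Int.negSucc c := by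
        rw [Int.negSucc_eq]; omega
      rw [if_pos h1, if_neg h2]
      have e2 : -Int.negSucc c - 1 = (c : Int) := by rw [Int.negSucc_eq]; ring
      rw [e2]
      simp
    · intro p
      rw [sub_land_testBit]
      simp [Int.testBit]

-- popcount of (m & b) as a sum of bit products
theorem K1 : ∀ (k m : Nat) (b : Int), m < 2 ^ k →
    PySem.Int.bitCount (PySem.Int.band (m : Int) b) =
      ∑ p ∈ Finset.range k, bit1 m p * bit2 b p := by
  intro k m b hm
  obtain ⟨w, hw, hwm, hbits⟩ := band_toNat m b
  rw [hw, pc_cast k w (lt_of_le_of_lt hwm hm)]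
  apply Finset.sum_congr rfl
  intro p _
  simp only [bit1, bit2, hbits]
  by_cases h1 : m.testBit p <;> by_cases h2 : b.testBit p <;> simp [h1, h2]

theorem loop_stop (m b : Int) (h : ¬ 0 < m) (ns : Nat) : getSignLoopA m b ns = ns := by
  rw [getSignLoopA]; simp [h]

theorem loop_step (m b : Int) (h : 0 < m) (ns : Nat) :
    getSignLoopA m b ns =
      getSignLoopA (PySem.Int.floordiv m 2) b (ns + PySem.Int.bitCount (PySem.Int.band m b)) := by
  conv_lhs => rw [getSignLoopA]
  simp [h]

-- the loop's accumulator is additive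
theorem loop_acc_aux : ∀ (k : Nat) (m b : Int), m.toNat ≤ k →
    ∀ ns, getSignLoopA m b ns = ns + getSignLoopA m b 0 := by
  intro k
  induction k with
  | zero =>
    intro m b hm ns
    have h : ¬ 0 < m := by omega
    rw [loop_stop m b h, loop_stop m b h]; omega
  | succ k ih =>
    intro m b hm ns
    by_cases h : 0 < m
    · have hlt : (PySem.Int.floordiv m 2).toNat ≤ k := by
        rw [PySem.Int.floordiv_eq_ediv_of_pos (by omega : (0:Int) < 2)]; omega
      rw [loop_step m b h ns, loop_step m b h 0,
        ih _ b hlt (ns + PySem.Int.bitCount (PySem.Int.band m b)),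
        ih _ b hlt (0 + PySem.Int.bitCount (PySem.Int.band m b))]
      omega
    · rw [loop_stop m b h, loop_stop m b h]; omega

theorem loop_acc (m b : Int) (ns : Nat) :
    getSignLoopA m b ns = ns + getSignLoopA m b 0 :=
  loop_acc_aux m.toNat m b le_rfl ns

theorem loop_rec (m b : Int) (h : 0 < m) :
    getSignLoopA m b 0 =
      PySem.Int.bitCount (PySem.Int.band m b) + getSignLoopA (PySem.Int.floordiv m 2) b 0 := by
  rw [loop_step m b h 0, loop_acc]
  omega

theorem cast_floordiv_two (m : Nat) :
    PySem.Int.floordiv (m : Int) 2 = ((m / 2 : Nat) : Int) := by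
  exact_mod_cast PySem.Int.floordiv_natCast m 2

-- A's loop result counts the pairs (bit of m at position i, bit of b at position j ≤ i)
theorem A2 : ∀ (k m : Nat) (b : Int), m < 2 ^ k →
    getSignLoopA (m : Int) b 0 = ∑ i ∈ Finset.range k, bit1 m i * ones b (i + 1) := by
  intro k
  induction k with
  | zero =>
    intro m b hm; interval_cases m
    rw [getSignLoopA]; simp
  | succ k ih =>
    intro m b hm
    rcases Nat.eq_zero_or_pos m with h0 | h0
    · subst h0
      rw [getSignLoopA]; simp [bit1]
    · rw [loop_rec _ _ (by exact_mod_cast h0), cast_floordiv_two,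
        K1 (k + 1) m b hm, ih (m / 2) b (by omega)]
      have h2 : ∀ p, bit1 (m / 2) p = bit1 m (p + 1) := by
        intro p; simp [bit1, Nat.testBit_div_two]
      simp only [h2]
      have hones : ∀ i, ones b (i + 1) = ones b i + bit2 b i := by
        intro i; simp [ones, Finset.sum_range_succ]
      have hsplit : ∑ i ∈ Finset.range (k + 1), bit1 m i * ones b (i + 1)
          = ∑ i ∈ Finset.range (k + 1), (bit1 m i * ones b i + bit1 m i * bit2 b i) := by
        refine Finset.sum_congr rfl fun i _ => ?_
        rw [hones i, Nat.mul_add]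
      rw [hsplit, Finset.sum_add_distrib]
      have hre : ∑ i ∈ Finset.range (k + 1), bit1 m i * ones b i
           = ∑ i ∈ Finset.range k, bit1 m (i + 1) * ones b (i + 1) := by
        rw [Finset.sum_range_succ']
        simp [ones]
      omega

-- '(x >> p) & 1 == 1' is Python's bit p of x
theorem bandbit (x : Int) (p : Nat) :
    (PySem.Int.band (x >>> (p : Int)) 1 = 1) ↔ x.testBit p = true := by
  rw [PySem.Int.band_one, PySem.Int.mod_eq_emod_of_pos (by omega : (0:Int) < 2)]
  have hb : ∀ n : Nat, n.testBit p = decide ((n >>> p) % 2 = 1) := by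
    intro n
    rw [← Nat.testBit_zero (n >>> p), Nat.testBit_shiftRight, Nat.add_zero]
  cases x with
  | ofNat n =>
    have hform : Int.ofNat n = (n : Int) := rfl
    rw [hform, Int.shiftRight_natCast]
    simp only [Int.testBit, hb]
    have hc : ((n >>> p : Nat) : Int) % 2 = (((n >>> p) % 2 : Nat) : Int) := by norm_cast
    rcases Nat.mod_two_eq_zero_or_one (n >>> p) with h | h <;>
      rw [hc, h] <;> simp
  | negSucc n =>
    rw [Int.shiftRight_negSucc]
    simp only [Int.testBit, hb]
    have he : Int.negSucc (n >>> p) = -((n >>> p : Nat) : Int) - 1 := by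
      rw [Int.negSucc_eq]; ring
    rcases Nat.mod_two_eq_zero_or_one (n >>> p) with h | h
    · have : Int.negSucc (n >>> p) % 2 = 1 := by rw [he]; omega
      rw [this, h]; simp
    · have : Int.negSucc (n >>> p) % 2 = 0 := by rw [he]; omega
      rw [this, h]; simp

-- invariant of B's fold: (pair count below n, number of index2-bits below n)
theorem B1 (a : Nat) (index2 : Int) : ∀ (n : Nat),
    (List.range n).foldl
      (fun (st : Nat × Nat) (p : Nat) =>
        (if p ≠ 0 ∧ PySem.Int.band ((a : Int) >>> (p : Int)) 1 = 1 then st.1 + st.2 else st.1,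
         if PySem.Int.band (index2 >>> (p : Int)) 1 = 1 then st.2 + 1 else st.2))
      (0, 0)
    = (∑ q ∈ Finset.range n, bit1 a q * ones index2 q, ones index2 n) := by
  intro n
  induction n with
  | zero => simp [ones]
  | succ n ih =>
    rw [List.range_succ, List.foldl_append, ih]
    simp only [List.foldl_cons, List.foldl_nil, Prod.mk.injEq]
    have hcast : ((a : Int)).testBit n = a.testBit n := rfl
    constructor
    · rw [Finset.sum_range_succ]
      split_ifs with hcase
      · obtain ⟨_, hb⟩ := hcase
        have ht : a.testBit n = true := by rw [← hcast]; exact (bandbit (a : Int) n).mp hb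
        simp [bit1, ht]
      · rcases Nat.eq_zero_or_pos n with hn | hn
        · subst hn; simp [ones]
        · have hb : ¬ PySem.Int.band ((a : Int) >>> (n : Int)) 1 = 1 := fun hb =>
            hcase ⟨by omega, hb⟩
          have ht : a.testBit n = false := by
            by_contra hc
            exact hb ((bandbit (a : Int) n).mpr
              (by rw [hcast]; exact (Bool.not_eq_false _).mp hc))
          simp [bit1, ht]
    · split_ifs with hb
      · have ht : index2.testBit n = true := (bandbit index2 n).mp hb
        rw [ones_succ]; simp [bit2, ht]
      · have ht : index2.testBit n = false := by
          by_contra hc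
          exact hb ((bandbit index2 n).mpr ((Bool.not_eq_false _).mp hc))
        rw [ones_succ]; simp [bit2, ht]

-- ===== VERDICT (by name: the statement is the Claim_ definition above) =====
theorem get_sign_py_spec : Claim_equal_get_sign_py := by
  intro index1 index2 _hdom hpre
  unfold Pre_get_sign_py at hpre
  unfold Spec_get_sign_py get_sign_py get_sign_py_alt
  obtain ⟨a, rfl⟩ : ∃ a : Nat, index1 = (a : Int) := ⟨index1.toNat, by omega⟩
  set K := PySem.Int.bitLength (a : Int) with hK
  have haK : a < 2 ^ K := by
    have := PySem.Int.lt_two_pow_bitLength (a : Int)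
    simpa using this
  have h2 : ∀ p, bit1 (a / 2) p = bit1 a (p + 1) := by
    intro p; simp [bit1, Nat.testBit_div_two]
  have hA : getSignLoopA (PySem.Int.floordiv (a : Int) 2) index2 0
      = ∑ q ∈ Finset.range K, bit1 a q * ones index2 q := by
    rw [cast_floordiv_two, A2 K (a / 2) index2 (by omega)]
    simp only [h2]
    have e1 : ∑ i ∈ Finset.range K, bit1 a (i + 1) * ones index2 (i + 1)
        = ∑ q ∈ Finset.range (K + 1), bit1 a q * ones index2 q := by
      rw [Finset.sum_range_succ']
      simp [ones]
    rw [e1, Finset.sum_range_succ]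
    have hlast : bit1 a K = 0 := by
      simp [bit1, Nat.testBit_lt_two_pow haK]
    rw [hlast]
    simp
  rw [B1 a index2 K, hA]
  show 2 * PySem.Int.mod (((∑ q ∈ Finset.range K, bit1 a q * ones index2 q : Nat) : Int) + 1) 2 - 1
      = 1 - 2 * PySem.Int.mod ((∑ q ∈ Finset.range K, bit1 a q * ones index2 q : Nat) : Int) 2
  rw [PySem.Int.mod_eq_emod_of_pos (by omega : (0:Int) < 2),
      PySem.Int.mod_eq_emod_of_pos (by omega : (0:Int) < 2)]
  omega
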